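-- pv_equiv track=rewrite | github.com/edu-rinaldi/Progettazione-di-Algoritmi | Backtracking/substringhe.py | stringa2
-- ===== SOURCE A (Python) =====
-- def stringa2(n):
--     """
--         ---------------------------------------------
--         IMPLEMENTAZIONE CON "PROGRAMMAZIONE DINAMICA"
--         ---------------------------------------------
--         Stampa tutte le str ternarie in cui non compare '02' or '20'
--         O(n)
--     """
--     t = [[0 for __ in range(n+1)] for _ in range(3)]
--     for j in range(n+1):
--         for i in range(3):
--             if j == 0: t[i][j] = 0
--             if j == 1: t[i][j] = 1
--             else: t[i][j] = t[1][j-1] + (0 if i==0 else t[2][j-1]) + (t[0][j-1] if i<2 else 0)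
--     return t[0][n]+t[1][n]+t[2][n]
-- ===== SOURCE B (Python) =====
-- def stringa2(n):
--     """
--     Count of ternary strings of length n with no '02' or '20' substring.
--     The counts satisfy s(j) = 2*s(j-1) + s(j-2) (s(0)=1, s(1)=3); compute it in
--     O(log n) by binary exponentiation of the 2x2 matrix M = [[2, 1], [1, 0]]:
--     (s(j+1), s(j)) = M^j . (3, 1), so s(n) = 3*c + d where M^n = [[a,b],[c,d]].
--     """
--     a, b, c, d = 1, 0, 0, 1          # accumulator, starts as the identity
--     e, f, g, h = 2, 1, 1, 0          # base, starts as M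
--     m = n
--     while m > 0:
--         if m % 2 == 1:
--             a, b, c, d = a*e + b*g, a*f + b*h, c*e + d*g, c*f + d*h
--         e, f, g, h = e*e + f*g, e*f + f*h, g*e + h*g, g*f + h*h
--         m //= 2
--     return 3*c + d
-- ===== Notes on version B (the rewrite author's own statement) =====
-- stated objective: faster
-- what changed: replaced the O(n) dynamic-programming table over three rows with O(log n) binary exponentiation of the 2x2 matrix of the linear recurrence s(j)=2*s(j-1)+s(j-2)
-- intended difference: for n = 0 A returns 0 (its base column is initialised to 0), while B returns 1, the correct count of length-0 ternary strings (the empty string avoids '02' and '20'). — e.g. on stringa2(0): A returns 0, B returns 1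
import Mathlib
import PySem

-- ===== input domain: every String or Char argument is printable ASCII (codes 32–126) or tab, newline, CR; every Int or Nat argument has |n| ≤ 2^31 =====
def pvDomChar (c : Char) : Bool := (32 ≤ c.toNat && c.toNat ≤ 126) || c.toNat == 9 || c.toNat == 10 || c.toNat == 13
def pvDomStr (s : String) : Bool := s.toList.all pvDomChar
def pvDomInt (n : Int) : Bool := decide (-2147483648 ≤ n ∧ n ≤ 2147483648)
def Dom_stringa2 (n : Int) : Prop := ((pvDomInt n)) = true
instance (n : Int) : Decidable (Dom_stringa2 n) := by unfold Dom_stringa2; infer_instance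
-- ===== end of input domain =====

-- B replaces A's O(n) three-row DP table with binary exponentiation of the 2x2 matrix of
-- the recurrence s(j) = 2*s(j-1) + s(j-2); at n = 0 A returns 0 while B returns the
-- intended count 1 (stated as D_ below).

-- ===== PORT A =====
-- t[i][j] read / write (the j-1 = -1 read at j = 0 wraps to the last column, as in Python)
def pvGet (t : List (List Int)) (i j : Int) : Int :=
  PySem.List.pyGetD (PySem.List.pyGetD t i []) j 0

def pvSet (t : List (List Int)) (i j : Int) (v : Int) : List (List Int) :=
  PySem.List.pySetD t i (PySem.List.pySetD (PySem.List.pyGetD t i []) j v)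

-- body of the inner 'for i in range(3)' loop, statement for statement
def pvInner (j : Int) (t : List (List Int)) (i : Int) : List (List Int) :=
  let t1 := if j == 0 then pvSet t i j 0 else t
  if j == 1 then pvSet t1 i j 1
  else pvSet t1 i j (pvGet t1 1 (j-1) + (if i == 0 then 0 else pvGet t1 2 (j-1)) +
                     (if i < 2 then pvGet t1 0 (j-1) else 0))

-- body of the outer 'for j in range(n+1)' loop
def pvCol (t : List (List Int)) (j : Int) : List (List Int) :=
  (PySem.List.pyRange 0 3 1).foldl (pvInner j) t

def stringa2 (n : Int) : Int :=
  let t := (PySem.List.pyRange 0 (n+1) 1).foldl pvCol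
    ((PySem.List.pyRange 0 3 1).map (fun _ => (PySem.List.pyRange 0 (n+1) 1).map (fun _ => (0:Int))))
  pvGet t 0 n + pvGet t 1 n + pvGet t 2 n

-- ===== PORT B =====
-- the 'while m > 0' loop of Source B: the eight scalars are the accumulator and base matrices.
-- 'm //= 2' is Lean's Int '/' here: for the only values reaching it (m > 0) it equals Python's floor division.
def pvPowLoop (m a b c d e f g h : Int) : Int × Int × Int × Int :=
  if hm : 0 < m then
    let acc := if m % 2 == 1 then (a*e + b*g, a*f + b*h, c*e + d*g, c*f + d*h) else (a, b, c, d)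
    pvPowLoop (m / 2) acc.1 acc.2.1 acc.2.2.1 acc.2.2.2 (e*e + f*g) (e*f + f*h) (g*e + h*g) (g*f + h*h)
  else (a, b, c, d)
termination_by m.toNat
decreasing_by omega

def stringa2_alt (n : Int) : Int :=
  let r := pvPowLoop n 1 0 0 1 2 1 1 0
  3 * r.2.2.1 + r.2.2.2

-- ===== PRECONDITION & SPEC =====
-- Pre_ excludes exactly n < 0, on which A raises IndexError (t[0][n] on empty rows).
def Pre_stringa2 (n : Int) : Prop := 0 ≤ n
instance (n : Int) : Decidable (Pre_stringa2 n) := by unfold Pre_stringa2; infer_instance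
def pvWitness_stringa2 : Int := 2

-- For n = 0 A returns 0 (its base table column is initialised to 0), while B returns 1,
-- the correct count of length-0 ternary strings: the empty string avoids '02' and '20'.
def D_stringa2 (n : Int) : Prop := n = 0
instance (n : Int) : Decidable (D_stringa2 n) := by unfold D_stringa2; infer_instance

def Spec_stringa2 (n : Int) (out : Int) : Prop := ¬ D_stringa2 n → out = stringa2_alt n
instance (n : Int) (out : Int) : Decidable (Spec_stringa2 n out) := by unfold Spec_stringa2; infer_instance

def pvDiffWitness_stringa2 : Int := 0
def pvDiffWitnessOut_stringa2 : Int × Int := (0, 1)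

-- ===== CLAIM (what is proved, stated in full; the proofs are below) =====
def Claim_unchanged_stringa2 : Prop := ∀ (n : Int), Dom_stringa2 n → Pre_stringa2 n → Spec_stringa2 n (stringa2 n)
def Claim_changed_stringa2 : Prop := Dom_stringa2 (pvDiffWitness_stringa2) ∧ Pre_stringa2 (pvDiffWitness_stringa2) ∧ D_stringa2 (pvDiffWitness_stringa2) ∧ stringa2 (pvDiffWitness_stringa2) = pvDiffWitnessOut_stringa2.1 ∧ stringa2_alt (pvDiffWitness_stringa2) = pvDiffWitnessOut_stringa2.2 ∧ pvDiffWitnessOut_stringa2.1 ≠ pvDiffWitnessOut_stringa2.2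
def Claim_exact_stringa2 : Prop := ∀ (n : Int), Dom_stringa2 n → Pre_stringa2 n → D_stringa2 n → stringa2 n ≠ stringa2_alt n

-- ===== LEMMAS AND PROOFS =====

-- Pell numbers: both sides are reduced to them.
def pvP : Nat → Int
  | 0 => 0
  | 1 => 1
  | (k+2) => 2 * pvP (k+1) + pvP k

-- the column values A's table carries: pvV j = (t[0][j], t[1][j], t[2][j])
def pvV : Nat → Int × Int × Int
  | 0 => (0, 0, 0)
  | 1 => (1, 1, 1)
  | (j+2) =>
      let p := pvV (j+1)
      (p.1 + p.2.1, p.1 + p.2.1 + p.2.2, p.2.1 + p.2.2)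

-- row i of A's table after columns 0..m have been processed (table width N)
def pvRow (N m : Nat) (f : Nat → Int) : List Int :=
  (List.range N).map (fun k => if k ≤ m then f k else 0)

def pvState (N m : Nat) : List (List Int) :=
  [ pvRow N m (fun k => (pvV k).1),
    pvRow N m (fun k => (pvV k).2.1),
    pvRow N m (fun k => (pvV k).2.2) ]

def pvZ (N : Nat) : List Int := List.replicate N (0:Int)

lemma pv_set_map_range (N k : Nat) (f : Nat → Int) (x : Int) (h : k < N) :
    ((List.range N).map f).set k x = (List.range N).map (fun j => if j = k then x else f j) := by
  apply List.ext_getElem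
  · simp
  · intro i h1 h2
    simp only [List.getElem_set, List.getElem_map, List.getElem_range]
    rcases eq_or_ne i k with rfl | hik
    · simp
    · simp [hik, Ne.symm hik]

lemma pv_row_set (N m : Nat) (f : Nat → Int) (v : Int) (h : m+1 < N) (hv : v = f (m+1)) :
    PySem.List.pySetD (pvRow N m f) ((m:Int)+1) v = pvRow N (m+1) f := by
  have h1 : ((m:Int)+1) = ((m+1 : Nat) : Int) := by push_cast; ring
  rw [h1, PySem.List.pySetD_natCast, pvRow, pv_set_map_range _ _ _ _ h, pvRow]
  congr 1; funext k
  by_cases h2 : k = m+1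
  · simp [h2, hv]
  · simp [h2, show (k ≤ m ↔ k ≤ m+1) from by omega]

lemma pv_get_row (N m j : Nat) (f : Nat → Int) (h : j < N) :
    PySem.List.pyGetD (pvRow N m f) (j : Int) 0 = if j ≤ m then f j else 0 := by
  simp [pvRow, PySem.List.pyGetD_natCast, List.getD_eq_getElem?_getD, h]

lemma pyRange3 : PySem.List.pyRange 0 3 1 = [0, 1, 2] := by decide

-- literal-state reductions
lemma pvSetL0 (r0 r1 r2 : List Int) (j v : Int) :
    pvSet [r0,r1,r2] 0 j v = [PySem.List.pySetD r0 j v, r1, r2] := by simp [pvSet, pysem]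
lemma pvSetL1 (r0 r1 r2 : List Int) (j v : Int) :
    pvSet [r0,r1,r2] 1 j v = [r0, PySem.List.pySetD r1 j v, r2] := by simp [pvSet, pysem]
lemma pvSetL2 (r0 r1 r2 : List Int) (j v : Int) :
    pvSet [r0,r1,r2] 2 j v = [r0, r1, PySem.List.pySetD r2 j v] := by simp [pvSet, pysem]
lemma pvGetL0 (r0 r1 r2 : List Int) (j : Int) :
    pvGet [r0,r1,r2] 0 j = PySem.List.pyGetD r0 j 0 := by simp [pvGet, pysem]
lemma pvGetL1 (r0 r1 r2 : List Int) (j : Int) :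
    pvGet [r0,r1,r2] 1 j = PySem.List.pyGetD r1 j 0 := by simp [pvGet, pysem]
lemma pvGetL2 (r0 r1 r2 : List Int) (j : Int) :
    pvGet [r0,r1,r2] 2 j = PySem.List.pyGetD r2 j 0 := by simp [pvGet, pysem]

lemma pvInner_else0 (j : Int) (hj0 : (j == 0) = false) (hj1 : (j == 1) = false)
    (r0 r1 r2 : List Int) :
    pvInner j [r0,r1,r2] 0 =
      [PySem.List.pySetD r0 j (PySem.List.pyGetD r1 (j-1) 0 + 0 + PySem.List.pyGetD r0 (j-1) 0), r1, r2] := by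
  simp only [pvInner, hj0, hj1, Bool.false_eq_true, if_false]
  norm_num [pvGetL0, pvGetL1, pvSetL0]

lemma pvInner_else1 (j : Int) (hj0 : (j == 0) = false) (hj1 : (j == 1) = false)
    (r0 r1 r2 : List Int) :
    pvInner j [r0,r1,r2] 1 =
      [r0, PySem.List.pySetD r1 j (PySem.List.pyGetD r1 (j-1) 0 + PySem.List.pyGetD r2 (j-1) 0 + PySem.List.pyGetD r0 (j-1) 0), r2] := by
  simp only [pvInner, hj0, hj1, Bool.false_eq_true, if_false]
  norm_num [pvGetL0, pvGetL1, pvGetL2, pvSetL1]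

lemma pvInner_else2 (j : Int) (hj0 : (j == 0) = false) (hj1 : (j == 1) = false)
    (r0 r1 r2 : List Int) :
    pvInner j [r0,r1,r2] 2 =
      [r0, r1, PySem.List.pySetD r2 j (PySem.List.pyGetD r1 (j-1) 0 + PySem.List.pyGetD r2 (j-1) 0)] := by
  simp only [pvInner, hj0, hj1, Bool.false_eq_true, if_false]
  norm_num [pvGetL1, pvGetL2, pvSetL2]

lemma pv_row_set' (N m : Nat) (f : Nat → Int) (v : Int) (j : Int) (hj : j = ((m+1 : Nat) : Int))
    (h : m+1 < N) (hv : v = f (m+1)) :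
    PySem.List.pySetD (pvRow N m f) j v = pvRow N (m+1) f := by
  have h1 : j = ((m:Int)+1) := by rw [hj]; push_cast; ring
  rw [h1, pv_row_set N m f v h hv]

-- processing column m+2 (m+1 ≥ 1 columns already done) advances the table state by one column
lemma pv_state_step (N m : Nat) (hN : m + 2 < N) :
    pvCol (pvState N (m+1)) ((m : Int) + 2) = pvState N (m+2) := by
  have hj0 : (((m:Int) + 2) == 0) = false := by simp; omega
  have hj1 : (((m:Int) + 2) == 1) = false := by simp; omega
  have hjm : ((m:Int) + 2) - 1 = ((m+1 : Nat) : Int) := by push_cast; ring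
  have hjc : ((m:Int) + 2) = ((m+1+1 : Nat) : Int) := by push_cast; ring
  have hlt : m + 1 < N := by omega
  have hlt2 : m + 1 + 1 < N := by omega
  rw [pvCol, pyRange3]
  simp only [List.foldl_cons, List.foldl_nil, pvState]
  rw [pvInner_else0 _ hj0 hj1, hjm,
      pv_get_row N (m+1) (m+1) _ hlt, pv_get_row N (m+1) (m+1) _ hlt]
  simp only [le_refl, if_true]
  rw [pv_row_set' N (m+1) _ _ _ hjc hlt2 (by show _ = (pvV (m+1+1)).1; simp only [pvV]; try ring)]
  rw [pvInner_else1 _ hj0 hj1, hjm,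
      pv_get_row N (m+1) (m+1) _ hlt, pv_get_row N (m+1+1) (m+1) _ hlt,
      pv_get_row N (m+1) (m+1) _ hlt]
  simp only [le_refl, if_true, show (m+1 ≤ m+1+1) = True from by simp]
  rw [pv_row_set' N (m+1) _ _ _ hjc hlt2 (by show _ = (pvV (m+1+1)).2.1; simp only [pvV]; try ring)]
  rw [pvInner_else2 _ hj0 hj1, hjm,
      pv_get_row N (m+1+1) (m+1) _ hlt, pv_get_row N (m+1) (m+1) _ hlt]
  simp only [le_refl, if_true, show (m+1 ≤ m+1+1) = True from by simp]
  rw [pv_row_set' N (m+1) _ _ _ hjc hlt2 (by show _ = (pvV (m+1+1)).2.2; simp only [pvV]; try ring)]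

lemma pvZ_get (N : Nat) (i : Int) : PySem.List.pyGetD (pvZ N) i 0 = 0 := by
  by_cases h : PySem.Raise.InRange (pvZ N).length i
  · exact List.eq_of_mem_replicate (PySem.List.pyGetD_mem (pvZ N) (0:Int) h)
  · rw [PySem.List.pyGetD_of_none _ _ _ ((PySem.List.pyGet?_eq_none_iff (pvZ N) i).mpr h)]

lemma pvZ_set (N : Nat) (k : Nat) : (pvZ N).set k 0 = pvZ N := by
  apply List.ext_getElem
  · simp [pvZ]
  · intro i h1 h2
    simp [pvZ]

lemma pvZ_setD (N : Nat) (j : Int) (hj : 0 ≤ j) : PySem.List.pySetD (pvZ N) j 0 = pvZ N := by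
  rw [PySem.List.pySetD_of_nonneg _ _ hj, pvZ_set]

-- column 0 leaves the all-zero table unchanged (including the negative-index reads)
lemma pvCol_zero (N : Nat) : pvCol [pvZ N, pvZ N, pvZ N] 0 = [pvZ N, pvZ N, pvZ N] := by
  have h0 : pvInner 0 [pvZ N, pvZ N, pvZ N] 0 = [pvZ N, pvZ N, pvZ N] := by
    rw [pvInner]
    norm_num [pvSetL0, pvGetL0, pvGetL1, pvGetL2, pvZ_get, pvZ_setD]
  have h1 : pvInner 0 [pvZ N, pvZ N, pvZ N] 1 = [pvZ N, pvZ N, pvZ N] := by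
    rw [pvInner]
    norm_num [pvSetL1, pvGetL0, pvGetL1, pvGetL2, pvZ_get, pvZ_setD]
  have h2 : pvInner 0 [pvZ N, pvZ N, pvZ N] 2 = [pvZ N, pvZ N, pvZ N] := by
    rw [pvInner]
    norm_num [pvSetL2, pvGetL0, pvGetL1, pvGetL2, pvZ_get, pvZ_setD]
  rw [pvCol, pyRange3]
  simp only [List.foldl_cons, List.foldl_nil, h0, h1, h2]

lemma pvZ_eq_row0 (N : Nat) : pvZ N = pvRow N 0 (fun k => (0:Int)) := by
  apply List.ext_getElem
  · simp [pvZ, pvRow]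
  · intro i h1 h2
    simp [pvZ, pvRow]

-- column 1 writes the all-ones column
lemma pvCol_one (N : Nat) (hN : 1 < N) :
    pvCol [pvZ N, pvZ N, pvZ N] 1 = pvState N 1 := by
  have hset : PySem.List.pySetD (pvZ N) 1 1 = pvRow N 1 (fun k => if k = 0 then 0 else 1) := by
    rw [pvZ_eq_row0]
    have := pv_row_set' N 0 (fun k => if k = 0 then 0 else 1) 1 1 (by norm_num) (by omega) (by norm_num)
    rw [← this]
    congr 1
    rw [pvRow, pvRow]
    congr 1; funext k
    by_cases hk : k = 0 <;> simp [hk]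
  have h0 : pvInner 1 [pvZ N, pvZ N, pvZ N] 0 =
      [pvRow N 1 (fun k => if k = 0 then 0 else 1), pvZ N, pvZ N] := by
    rw [pvInner]; norm_num [pvSetL0, hset]
  have h1 : ∀ r2, pvInner 1 [pvRow N 1 (fun k => if k = 0 then 0 else 1), pvZ N, r2] 1 =
      [pvRow N 1 (fun k => if k = 0 then 0 else 1), pvRow N 1 (fun k => if k = 0 then 0 else 1), r2] := by
    intro r2
    rw [pvInner]; norm_num [pvSetL1, hset]
  have h2 : pvInner 1 [pvRow N 1 (fun k => if k = 0 then 0 else 1), pvRow N 1 (fun k => if k = 0 then 0 else 1), pvZ N] 2 =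
      [pvRow N 1 (fun k => if k = 0 then 0 else 1), pvRow N 1 (fun k => if k = 0 then 0 else 1), pvRow N 1 (fun k => if k = 0 then 0 else 1)] := by
    rw [pvInner]; norm_num [pvSetL2, hset]
  rw [pvCol, pyRange3]
  simp only [List.foldl_cons, List.foldl_nil, h0, h1, h2]
  rw [pvState]
  have : pvRow N 1 (fun k => if k = 0 then 0 else 1) = pvRow N 1 (fun k => (pvV k).1) ∧
         pvRow N 1 (fun k => if k = 0 then 0 else 1) = pvRow N 1 (fun k => (pvV k).2.1) ∧
         pvRow N 1 (fun k => if k = 0 then 0 else 1) = pvRow N 1 (fun k => (pvV k).2.2) := by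
    refine ⟨?_, ?_, ?_⟩ <;>
    · rw [pvRow, pvRow]; congr 1; funext k
      match k with
      | 0 => simp [pvV]
      | 1 => simp [pvV]
      | (k+2) => simp [show ¬(k+2 ≤ 1) from by omega]
  nth_rewrite 3 [this.2.2]
  nth_rewrite 2 [this.2.1]
  rw [this.1]

lemma pv_fold (N : Nat) : ∀ m : Nat, 1 ≤ m → m < N →
    (PySem.List.pyRange 0 ((m : Int) + 1) 1).foldl pvCol [pvZ N, pvZ N, pvZ N] = pvState N m := by
  intro m
  induction m with
  | zero => omega
  | succ m ih =>
      intro _ hmN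
      rcases Nat.eq_zero_or_pos m with rfl | hm
      · rw [show ((0+1 : Nat) : Int) + 1 = 2 from by norm_num,
            show PySem.List.pyRange 0 2 1 = [0, 1] from by decide]
        simp only [List.foldl_cons, List.foldl_nil]
        rw [pvCol_zero, pvCol_one N (by omega)]
      · have hc : ((m+1 : Nat) : Int) + 1 = ((m : Int) + 1) + 1 := by push_cast; ring
        rw [hc, PySem.List.pyRange_one_succ_right (by omega), List.foldl_append]
        simp only [List.foldl_cons, List.foldl_nil]
        rw [ih (by omega) (by omega)]
        obtain ⟨m', rfl⟩ : ∃ m', m = m' + 1 := ⟨m - 1, by omega⟩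
        have hc2 : ((m'+1 : Nat) : Int) + 1 = ((m' : Int) + 2) := by push_cast; ring
        rw [hc2, pv_state_step N m' (by omega)]

lemma pv_A_val (m : Nat) : stringa2 ((m : Int) + 1) =
    (pvV (m+1)).1 + (pvV (m+1)).2.1 + (pvV (m+1)).2.2 := by
  rw [stringa2]
  have hz : (PySem.List.pyRange 0 (((m : Int) + 1) + 1) 1).map (fun _ => (0:Int)) = pvZ (m+2) := by
    rw [List.map_const', pvZ, PySem.List.length_pyRange_one]
    norm_num
    omega
  have hinit : (PySem.List.pyRange 0 3 1).map
      (fun _ => (PySem.List.pyRange 0 (((m : Int) + 1) + 1) 1).map (fun _ => (0:Int))) =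
      [pvZ (m+2), pvZ (m+2), pvZ (m+2)] := by
    rw [pyRange3]
    simp only [List.map_cons, List.map_nil, hz]
  rw [hinit]
  have hc : ((m : Int) + 1) + 1 = ((m+1 : Nat) : Int) + 1 := by push_cast; ring
  rw [hc, pv_fold (m+2) (m+1) (by omega) (by omega)]
  have hm : ((m : Int) + 1) = ((m+1 : Nat) : Int) := by push_cast; ring
  rw [pvState, pvGetL0, pvGetL1, pvGetL2, hm,
      pv_get_row (m+2) (m+1) (m+1) _ (by omega),
      pv_get_row (m+2) (m+1) (m+1) _ (by omega),
      pv_get_row (m+2) (m+1) (m+1) _ (by omega)]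
  simp only [le_refl, if_true]

lemma pv_V_char : ∀ m : Nat,
    ((pvV (m+1)).1 + (pvV (m+1)).2.1 + (pvV (m+1)).2.2 = pvP (m+1) + pvP (m+2)) ∧
    ((pvV (m+1)).2.1 = pvP m + pvP (m+1)) := by
  intro m
  induction m with
  | zero => simp [pvV, pvP]
  | succ k ih =>
      obtain ⟨h1, h2⟩ := ih
      have hr : pvP (k+3) = 2 * pvP (k+2) + pvP (k+1) := rfl
      have hv : pvV (k+2) = ((pvV (k+1)).1 + (pvV (k+1)).2.1,
                             (pvV (k+1)).1 + (pvV (k+1)).2.1 + (pvV (k+1)).2.2,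
                             (pvV (k+1)).2.1 + (pvV (k+1)).2.2) := rfl
      constructor
      · show (pvV (k+2)).1 + (pvV (k+2)).2.1 + (pvV (k+2)).2.2 = pvP (k+2) + pvP (k+3)
        rw [hv]
        have hr2 : pvP (k+2) = 2 * pvP (k+1) + pvP k := rfl
        dsimp only
        omega
      · show (pvV (k+2)).2.1 = pvP (k+1) + pvP (k+2)
        rw [hv]
        dsimp only
        omega

-- ===== B side =====
def pvMul (x y : Int × Int × Int × Int) : Int × Int × Int × Int :=
  (x.1*y.1 + x.2.1*y.2.2.1, x.1*y.2.1 + x.2.1*y.2.2.2,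
   x.2.2.1*y.1 + x.2.2.2*y.2.2.1, x.2.2.1*y.2.1 + x.2.2.2*y.2.2.2)

def pvPow (x : Int × Int × Int × Int) : Nat → Int × Int × Int × Int
  | 0 => (1, 0, 0, 1)
  | k+1 => pvMul (pvPow x k) x

lemma pv_mul_assoc (x y z : Int × Int × Int × Int) :
    pvMul (pvMul x y) z = pvMul x (pvMul y z) := by
  simp only [pvMul, Prod.mk.injEq]
  refine ⟨by ring, by ring, by ring, by ring⟩

lemma pv_mul_one (x : Int × Int × Int × Int) : pvMul x (1,0,0,1) = x := by
  simp [pvMul]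

lemma pv_one_mul (x : Int × Int × Int × Int) : pvMul (1,0,0,1) x = x := by
  simp [pvMul]

lemma pv_pow_succ' (x : Int × Int × Int × Int) (k : Nat) :
    pvPow x (k+1) = pvMul x (pvPow x k) := by
  induction k with
  | zero => show pvMul (1,0,0,1) x = pvMul x (1,0,0,1); rw [pv_mul_one, pv_one_mul]
  | succ j ih =>
      show pvMul (pvPow x (j+1)) x = pvMul x (pvPow x (j+1))
      nth_rewrite 1 [ih]
      rw [pv_mul_assoc]
      congr 1

lemma pv_pow_sq (x : Int × Int × Int × Int) (k : Nat) :
    pvPow (pvMul x x) k = pvPow x (2*k) := by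
  induction k with
  | zero => rfl
  | succ j ih =>
      show pvMul (pvPow (pvMul x x) j) (pvMul x x) = _
      rw [ih, show 2*(j+1) = (2*j+1)+1 from by ring]
      show _ = pvMul (pvPow x (2*j+1)) x
      show _ = pvMul (pvMul (pvPow x (2*j)) x) x
      rw [pv_mul_assoc]

lemma pv_loop_eq : ∀ (k : Nat) (m : Int), m.toNat = k → ∀ a b c d e f g h : Int,
    pvPowLoop m a b c d e f g h = pvMul (a,b,c,d) (pvPow (e,f,g,h) k) := by
  intro k
  induction k using Nat.strong_induction_on with
  | _ k ih =>
    intro m hk a b c d e f g h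
    rw [pvPowLoop]
    by_cases hm : 0 < m
    · have hk0 : 0 < k := by omega
      have hm2 : (m / 2).toNat = k / 2 := by omega
      have hsq : (e*e + f*g, e*f + f*h, g*e + h*g, g*f + h*h) = pvMul (e,f,g,h) (e,f,g,h) := rfl
      have hrec := ih (k/2) (Nat.div_lt_self hk0 one_lt_two) (m/2) hm2
      simp only [hm, dif_pos]
      by_cases hpar : m % 2 = 1
      · have hodd : k = 2*(k/2) + 1 := by omega
        simp only [hpar, beq_self_eq_true, if_true]
        rw [hrec, hsq, pv_pow_sq]
        show pvMul (pvMul (a,b,c,d) (e,f,g,h)) _ = _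
        rw [pv_mul_assoc]
        congr 1
        rw [← pv_pow_succ', ← hodd]
      · have heven : k = 2*(k/2) := by omega
        have hpar' : (m % 2 == 1) = false := by simp [hpar]
        simp only [hpar', Bool.false_eq_true, if_false]
        rw [hrec, hsq, pv_pow_sq, ← heven]
    · have hk0 : k = 0 := by omega
      simp only [hm, dif_neg, not_false_iff]
      rw [hk0]
      show (a,b,c,d) = pvMul (a,b,c,d) (1,0,0,1)
      rw [pv_mul_one]

lemma pv_pow_M (k : Nat) :
    pvPow (2,1,1,0) k = (pvP (k+1), pvP k, pvP k, pvP (k+1) - 2 * pvP k) := by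
  induction k with
  | zero => simp [pvPow, pvP]
  | succ j ih =>
      show pvMul (pvPow (2,1,1,0) j) (2,1,1,0) = _
      rw [ih]
      have hr : pvP (j+2) = 2 * pvP (j+1) + pvP j := rfl
      simp only [pvMul, Prod.mk.injEq]
      refine ⟨by rw [hr]; ring, by ring, by ring, by rw [hr]; ring⟩

lemma pv_B_val (k : Nat) : stringa2_alt (k : Int) = pvP k + pvP (k+1) := by
  show 3 * (pvPowLoop (k : Int) 1 0 0 1 2 1 1 0).2.2.1 + (pvPowLoop (k : Int) 1 0 0 1 2 1 1 0).2.2.2 = _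
  rw [pv_loop_eq k (k : Int) (by simp), pv_one_mul, pv_pow_M]
  ring

lemma pv_alt_zero : stringa2_alt 0 = 1 := by
  have h : pvPowLoop 0 1 0 0 1 2 1 1 0 = (1,0,0,1) := by
    rw [pvPowLoop]; norm_num
  show 3 * (pvPowLoop 0 1 0 0 1 2 1 1 0).2.2.1 + (pvPowLoop 0 1 0 0 1 2 1 1 0).2.2.2 = 1
  rw [h]
  norm_num

-- ===== VERDICT (by name: the statement is the Claim_ definition above) =====
theorem stringa2_spec : Claim_unchanged_stringa2 := by
  intro n _ hpre hD
  have hn : 1 ≤ n := by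
    unfold Pre_stringa2 at hpre
    unfold D_stringa2 at hD
    omega
  obtain ⟨m, hm⟩ : ∃ m : Nat, n = (m : Int) + 1 := ⟨(n - 1).toNat, by omega⟩
  subst hm
  rw [pv_A_val, show ((m : Int) + 1) = ((m+1 : Nat) : Int) from by push_cast; ring, pv_B_val]
  have he : pvP (m+1+1) = pvP (m+2) := rfl
  rw [he]
  have := pv_V_char m
  omega

theorem stringa2_changed : Claim_changed_stringa2 := by
  unfold Claim_changed_stringa2
  refine ⟨by decide, by decide, by decide, by decide, pv_alt_zero, by decide⟩

theorem stringa2_tight : Claim_exact_stringa2 := by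
  intro n _ _ hD
  have hn : n = 0 := hD
  subst hn
  have hA : stringa2 0 = 0 := by decide
  rw [hA, pv_alt_zero]
  decide
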